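-- pv_equiv track=rewrite | github.com/hdp0545/TIL | 2.Algorithm/pycharm/toss coding/1.py | solution
-- ===== SOURCE A (Python) =====
-- from collections import deque
--
-- def solution(servers, sticky, requests):
--     request_logs = {}
--     server_idx_que = deque([i for i in range(servers)])
--     list_servers = [[] for _ in range(servers)]
--     for idx, request in enumerate(requests):
--         if sticky:
--             if request in request_logs.keys():
--                 server_id = request_logs[request]
--                 server_idx_que.remove(server_id)
--             else:
--                 server_id = server_idx_que.popleft()
--                 request_logs[request] = server_id
--         else:
--             server_id = server_idx_que.popleft()
--         list_servers[server_id].append(request)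
--         server_idx_que.append(server_id)
--     return list_servers
-- ===== SOURCE B (Python) =====
-- from collections import deque
--
-- def solution(servers, sticky, requests):
--     buckets = [[] for _ in range(servers)]
--     if not sticky:
--         for i, req in enumerate(requests):
--             buckets[i % servers].append(req)
--         return buckets
--     last = {i: i - servers for i in range(servers)}
--     cand = deque((i - servers, i) for i in range(servers))
--     logs = {}
--     for t, req in enumerate(requests):
--         sid = logs.get(req)
--         if sid is None:
--             tm, sid = cand.popleft()
--             while tm != last[sid]:
--                 tm, sid = cand.popleft()
--             logs[req] = sid
--         last[sid] = t
--         cand.append((t, sid))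
--         buckets[sid].append(req)
--     return buckets
-- ===== Notes on version B (the rewrite author's own statement) =====
-- stated objective: alternative
-- what changed: Replaces A's slot queue with its O(servers) deque.remove on every sticky reuse by a per-server last-use timestamp dict plus an append-only (time, server) candidate queue with lazy invalidation: a reuse only re-stamps the server (no queue surgery), a new client pops candidates, skipping entries whose time no longer matches the server's current stamp; non-sticky requests use the closed form i % servers.
import Mathlib
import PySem

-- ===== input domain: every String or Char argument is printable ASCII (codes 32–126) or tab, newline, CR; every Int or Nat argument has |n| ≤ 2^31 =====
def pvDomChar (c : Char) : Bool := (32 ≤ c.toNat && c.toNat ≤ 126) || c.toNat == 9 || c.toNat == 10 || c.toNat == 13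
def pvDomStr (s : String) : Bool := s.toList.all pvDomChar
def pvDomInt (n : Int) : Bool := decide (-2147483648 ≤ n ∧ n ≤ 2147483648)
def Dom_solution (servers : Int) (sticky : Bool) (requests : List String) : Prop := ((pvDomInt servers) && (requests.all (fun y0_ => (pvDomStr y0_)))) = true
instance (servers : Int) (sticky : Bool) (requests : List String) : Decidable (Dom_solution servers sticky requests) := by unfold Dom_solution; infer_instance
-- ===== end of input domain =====

-- B replaces A's slot queue (deque.remove on every sticky reuse) by last-use timestamps
-- plus an append-only lazily-invalidated (time, server) candidate queue: a reuse only
-- re-stamps its server, a new client pops candidates skipping superseded ones; non-sticky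
-- requests use the closed form i % servers (alternative).

-- ===== PORT A =====
-- list_servers[server_id].append(request)
def pvAppendAt (lss : List (List String)) (sid : Int) (request : String) : List (List String) :=
  PySem.List.pySetD lss sid (PySem.List.pyGetD lss sid [] ++ [request])

-- the body of A's for-loop; state = (request_logs, server_idx_que, list_servers)
def pvAStep (sticky : Bool) (st : PySem.Dict String Int × List Int × List (List String))
    (request : String) : PySem.Dict String Int × List Int × List (List String) :=
  let (logs, que, lss) := st
  if sticky then
    if logs.contains request then
      let sid := logs.getD request 0            -- request_logs[request]; present by the contains test
      let que1 := (PySem.List.remove? que sid).getD que  -- server_idx_que.remove(server_id); ValueError unreachable (sid is always in the queue)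
      (logs, que1 ++ [sid], pvAppendAt lss sid request)
    else
      match que with
      | [] => (logs, que, lss)                  -- Python raises IndexError (popleft on empty); excluded by Pre_
      | sid :: rest => (logs.insert request sid, rest ++ [sid], pvAppendAt lss sid request)
  else
    match que with
    | [] => (logs, que, lss)                    -- Python raises IndexError (popleft on empty); excluded by Pre_
    | sid :: rest => (logs, rest ++ [sid], pvAppendAt lss sid request)

def solution (servers : Int) (sticky : Bool) (requests : List String) : List (List String) :=
  ((PySem.List.enumerate requests).foldl (fun st p => pvAStep sticky st p.2)
    (PySem.Dict.empty, PySem.List.pyRange 0 servers 1,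
     (PySem.List.pyRange 0 servers 1).map (fun _ => []))).2.2

-- ===== PORT B =====
-- the while loop: tm, sid = cand.popleft(); while tm != last[sid]: tm, sid = cand.popleft()
-- (last[sid] is a present key, so getD's default is unreachable)
def pvSkip (last : PySem.Dict Int Int) : List (Int × Int) → Option ((Int × Int) × List (Int × Int))
  | [] => none                                  -- popleft on an empty deque raises IndexError; excluded by Pre_
  | e :: rest => if e.1 = last.getD e.2 0 then some (e, rest) else pvSkip last rest

-- the body of B's sticky for-loop over enumerate; state = (last, cand, logs, buckets)
def pvBStep (st : PySem.Dict Int Int × List (Int × Int) × PySem.Dict String Int × List (List String))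
    (p : Int × String) :
    PySem.Dict Int Int × List (Int × Int) × PySem.Dict String Int × List (List String) :=
  let (last, cand, logs, buckets) := st
  let t := p.1
  let req := p.2
  match logs.get? req with
  | some sid => (last.insert sid t, cand ++ [(t, sid)], logs, pvAppendAt buckets sid req)
  | none =>
    match pvSkip last cand with
    | none => (last, cand, logs, buckets)       -- IndexError from popleft; excluded by Pre_
    | some (e, rest) =>
        (last.insert e.2 t, rest ++ [(t, e.2)], logs.insert req e.2, pvAppendAt buckets e.2 req)

def solution_alt (servers : Int) (sticky : Bool) (requests : List String) : List (List String) :=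
  let buckets0 : List (List String) := (PySem.List.pyRange 0 servers 1).map (fun _ => [])
  if sticky then
    ((PySem.List.enumerate requests).foldl pvBStep
      (PySem.Dict.mk ((PySem.List.pyRange 0 servers 1).map (fun i => (i, i - servers))),
       (PySem.List.pyRange 0 servers 1).map (fun i => (i - servers, i)),
       PySem.Dict.empty, buckets0)).2.2.2
  else
    (PySem.List.enumerate requests).foldl
      (fun buckets p => pvAppendAt buckets (PySem.Int.mod p.1 servers) p.2) buckets0

-- ===== PRECONDITION & SPEC =====
-- Pre_ excludes exactly the inputs on which A raises: with no server (servers ≤ 0) and at least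
-- one request, A's deque is empty and popleft raises IndexError.
def Pre_solution (servers : Int) (sticky : Bool) (requests : List String) : Prop :=
  0 < servers ∨ requests = []
instance (servers : Int) (sticky : Bool) (requests : List String) : Decidable (Pre_solution servers sticky requests) := by unfold Pre_solution; infer_instance

def pvWitness_solution : Int × Bool × List String := (2, true, ["a", "b", "a", "c"])

def Spec_solution (servers : Int) (sticky : Bool) (requests : List String) (out : List (List String)) : Prop := out = solution_alt servers sticky requests
instance (servers : Int) (sticky : Bool) (requests : List String) (out : List (List String)) : Decidable (Spec_solution servers sticky requests out) := by unfold Spec_solution; infer_instance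

-- ===== CLAIM (what is proved, stated in full; the proofs are below) =====
def Claim_equal_solution : Prop := ∀ (servers : Int) (sticky : Bool) (requests : List String), Dom_solution servers sticky requests → Pre_solution servers sticky requests → Spec_solution servers sticky requests (solution servers sticky requests)

-- ===== LEMMAS AND PROOFS =====

-- pyRange 0 servers 1 has no duplicate elements
lemma pyRange_nodup (servers : Int) : (PySem.List.pyRange 0 servers 1).Nodup := by
  simp only [PySem.List.pyRange]
  split
  · exact List.nodup_nil
  · exact (List.nodup_range).map (fun a b h => by omega)

-- B's initial timestamp of server i is i - servers
lemma init_last_getD (servers : Int) (i : Int) (hi : i ∈ PySem.List.pyRange 0 servers 1) :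
    (PySem.Dict.mk ((PySem.List.pyRange 0 servers 1).map (fun j => (j, j - servers)))).getD i 0
      = i - servers := by
  apply PySem.Dict.getD_of_mem_items
  · exact List.mem_map.2 ⟨i, hi, rfl⟩
  · show (((PySem.List.pyRange 0 servers 1).map _).map _).Nodup
    rw [List.map_map]
    exact (pyRange_nodup servers).map (fun a b h => by simpa using h)

-- a candidate entry is live iff its time is the server's current stamp
def pvValid (last : PySem.Dict Int Int) (e : Int × Int) : Bool := e.1 == last.getD e.2 0

lemma pvSkip_none_iff (last : PySem.Dict Int Int) (cand : List (Int × Int)) :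
    pvSkip last cand = none ↔ cand.filter (pvValid last) = [] := by
  induction cand with
  | nil => simp [pvSkip]
  | cons a tl ih =>
    by_cases h : a.1 = last.getD a.2 0
    · simp [pvSkip, h, List.filter_cons, pvValid]
    · simp [pvSkip, h, List.filter_cons, pvValid, ih]

lemma pvSkip_some (last : PySem.Dict Int Int) :
    ∀ (cand : List (Int × Int)) (e : Int × Int) (rest : List (Int × Int)),
      pvSkip last cand = some (e, rest) →
      cand.filter (pvValid last) = e :: rest.filter (pvValid last) ∧ ∀ x ∈ rest, x ∈ cand := by
  intro cand
  induction cand with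
  | nil => intro e rest h; simp [pvSkip] at h
  | cons a tl ih =>
    intro e rest h
    by_cases ha : a.1 = last.getD a.2 0
    · rw [pvSkip, if_pos ha] at h
      obtain ⟨he, hr⟩ : a = e ∧ tl = rest := by
        constructor <;> [exact congrArg (·.1) (Option.some_inj.1 h);
                        exact congrArg (·.2) (Option.some_inj.1 h)]
      subst he; subst hr
      refine ⟨by simp [List.filter_cons, pvValid, ha], fun x hx => List.mem_cons_of_mem a hx⟩
    · rw [pvSkip, if_neg ha] at h
      obtain ⟨h1, h2⟩ := ih e rest h
      refine ⟨?_, fun x hx => List.mem_cons_of_mem a (h2 x hx)⟩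
      rw [List.filter_cons, ← h1]
      simp [pvValid, ha]

-- re-stamping server sid at time t (newer than every candidate) kills exactly sid's live entry
lemma filter_valid_insert (last : PySem.Dict Int Int) (sid t : Int) (l : List (Int × Int))
    (hb : ∀ e ∈ l, e.1 < t) :
    l.filter (pvValid (last.insert sid t))
      = (l.filter (pvValid last)).filter (fun e => !(e.2 == sid)) := by
  rw [List.filter_filter]
  apply List.filter_congr
  intro e he
  simp only [pvValid, PySem.Dict.getD_insert]
  by_cases h : e.2 = sid
  · have : ¬ e.1 = t := by have := hb e he; omega
    simp [h, this]
  · simp [h]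

-- dropping the (unique) entry of server sid from the live list erases sid from the queue
lemma filter_ne_map_snd (sid : Int) :
    ∀ (vs : List (Int × Int)), (vs.map (·.2)).Nodup →
      (vs.filter (fun e => !(e.2 == sid))).map (·.2) = (vs.map (·.2)).erase sid := by
  intro vs
  induction vs with
  | nil => simp
  | cons a tl ih =>
    intro hnd
    rw [List.map_cons, List.nodup_cons] at hnd
    by_cases h : a.2 = sid
    · have hall : tl.filter (fun e => !(e.2 == sid)) = tl := by
        apply List.filter_eq_self.2
        intro e he
        simp only [Bool.not_eq_eq_eq_not, Bool.not_true, beq_eq_false_iff_ne, ne_eq]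
        intro hes
        refine hnd.1 ?_
        rw [h, ← hes]
        exact List.mem_map.2 ⟨e, he, rfl⟩
      rw [List.filter_cons, List.map_cons, h, List.erase_cons_head]
      simp [hall]
    · rw [List.filter_cons, List.map_cons, List.erase_cons_tail (by simpa using h)]
      simp only [show (!(a.2 == sid)) = true by simpa using h, if_true, List.map_cons]
      rw [ih hnd.2]

-- STICKY: A's queue is exactly the live (non-stale) part of B's candidate log, in order.
-- Invariant: the live candidates' server ids, in order, are A's queue; every candidate's
-- time is < t; the queue is a permutation of range(servers); logged server ids are in range.
lemma sticky_fold (servers : Int) (reqs : List String) :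
    ∀ (t : Int) (logs : PySem.Dict String Int) (que : List Int) (lss : List (List String))
      (last : PySem.Dict Int Int) (cand : List (Int × Int)),
      (cand.filter (pvValid last)).map (·.2) = que →
      (∀ e ∈ cand, e.1 < t) →
      que.Perm (PySem.List.pyRange 0 servers 1) →
      (∀ r s, logs.get? r = some s → s ∈ PySem.List.pyRange 0 servers 1) →
      ((PySem.List.enumerate reqs t).foldl (fun st p => pvAStep true st p.2) (logs, que, lss)).2.2
        = ((PySem.List.enumerate reqs t).foldl pvBStep (last, cand, logs, lss)).2.2.2 := by
  induction reqs with
  | nil => intro _ _ _ _ _ _ _ _ _ _; rfl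
  | cons req reqs ih =>
    intro t logs que lss last cand hlive hbnd hperm hlogs
    have hnd : que.Nodup := (hperm.nodup_iff).2 (pyRange_nodup servers)
    rw [PySem.List.enumerate_cons]
    simp only [List.foldl_cons]
    cases hg : logs.get? req with
    | some sid =>
      -- reuse: A removes sid and re-appends it; B just re-stamps sid and logs a new entry
      have hc : logs.contains req = true := by
        rw [PySem.Dict.contains_eq_isSome_get? logs req, hg]; rfl
      have hd : logs.getD req 0 = sid := PySem.Dict.getD_of_get?_eq_some logs 0 hg
      have hmem : sid ∈ que := hperm.mem_iff.2 (hlogs req sid hg)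
      have hrem : PySem.List.remove? que sid = some (que.erase sid) :=
        PySem.List.remove?_eq_some_erase que sid hmem
      simp only [pvAStep, pvBStep, hg, hc, hd, hrem, if_true, Option.getD_some]
      apply ih (t + 1) logs (que.erase sid ++ [sid]) _ (last.insert sid t) (cand ++ [(t, sid)])
      · rw [List.filter_append, filter_valid_insert last sid t cand hbnd, List.map_append,
          filter_ne_map_snd sid _ (hlive ▸ hnd), hlive]
        have : pvValid (last.insert sid t) (t, sid) = true := by
          simp [pvValid, PySem.Dict.getD_insert]
        simp [this]
      · intro e he
        rcases List.mem_append.1 he with he | he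
        · have := hbnd e he; omega
        · have : e = (t, sid) := by simpa using he
          rw [this]; omega
      · exact (List.perm_append_singleton sid _).trans ((List.perm_cons_erase hmem).symm.trans hperm)
      · exact hlogs
    | none =>
      have hc : logs.contains req = false := by
        rw [PySem.Dict.contains_eq_isSome_get? logs req, hg]; rfl
      cases hskip : pvSkip last cand with
      | none =>
        -- no live candidate ⇔ no server at all: both sides leave the state unchanged
        have hq : que = [] := by
          rw [← hlive, (pvSkip_none_iff last cand).1 hskip]; rfl
        simp only [pvAStep, pvBStep, hg, hc, hq, Bool.false_eq_true, if_false, hskip]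
        apply ih (t + 1) logs [] lss last cand
        · rw [← hq]; exact hlive
        · intro e he; have := hbnd e he; omega
        · rw [← hq]; exact hperm
        · exact hlogs
      | some er =>
        obtain ⟨e, rest⟩ := er
        obtain ⟨hfl, hsub⟩ := pvSkip_some last cand e rest hskip
        -- the first live candidate is A's queue head
        have hque : que = e.2 :: (rest.filter (pvValid last)).map (·.2) := by
          rw [← hlive, hfl, List.map_cons]
        have hrbnd : ∀ x ∈ rest, x.1 < t := fun x hx => hbnd x (hsub x hx)
        have hndq : ((rest.filter (pvValid last)).map (·.2)).Nodup ∧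
            e.2 ∉ (rest.filter (pvValid last)).map (·.2) := by
          have := hque ▸ hnd
          exact ⟨(List.nodup_cons.1 this).2, (List.nodup_cons.1 this).1⟩
        simp only [pvAStep, pvBStep, hg, hc, Bool.false_eq_true, if_false, hskip, hque]
        apply ih (t + 1) (logs.insert req e.2) _ _ (last.insert e.2 t) (rest ++ [(t, e.2)])
        · rw [List.filter_append, filter_valid_insert last e.2 t rest hrbnd, List.map_append,
            filter_ne_map_snd e.2 _ hndq.1, List.erase_of_not_mem hndq.2]
          have : pvValid (last.insert e.2 t) (t, e.2) = true := by
            simp [pvValid, PySem.Dict.getD_insert]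
          simp [this]
        · intro x hx
          rcases List.mem_append.1 hx with hx | hx
          · have := hrbnd x hx; omega
          · have : x = (t, e.2) := by simpa using hx
            rw [this]; omega
        · exact (List.perm_append_singleton e.2 _).trans (hque ▸ hperm)
        · intro r s h
          rw [PySem.Dict.get?_insert] at h
          split at h
          · have hs : s = e.2 := Option.some_inj.1 h.symm
            rw [hs]
            exact hperm.mem_iff.1 (hque ▸ List.mem_cons_self)
          · exact hlogs r s h

-- the non-sticky queue stays a rotation of range(servers): after k requests its head is k % servers
lemma nonsticky_fold (servers : Int) (hs : 0 < servers) (reqs : List String) :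
    ∀ (k : Nat) (logs : PySem.Dict String Int) (lss : List (List String)),
      ((PySem.List.enumerate reqs (k : Int)).foldl
          (fun st p => pvAStep false st p.2)
          (logs, (PySem.List.pyRange 0 servers 1).rotate (k % servers.toNat), lss)).2.2
        = (PySem.List.enumerate reqs (k : Int)).foldl
            (fun buckets p => pvAppendAt buckets (PySem.Int.mod p.1 servers) p.2) lss := by
  induction reqs with
  | nil => intro _ _ _; simp [PySem.List.enumerate]
  | cons req reqs ih =>
    intro k logs lss
    have hn : 0 < servers.toNat := by omega
    set L := PySem.List.pyRange 0 servers 1 with hL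
    have hlen : L.length = servers.toNat := by
      simp only [hL, PySem.List.pyRange]
      norm_num
      omega
    have hLk : ∀ j (hj : j < L.length), L[j] = (j : Int) := by
      intro j hj
      simp only [hL, PySem.List.pyRange, if_neg (by omega : ¬ (1:Int) = 0)] at hj ⊢
      simp only [List.getElem_map, List.getElem_range]
      omega
    have hne : L.rotate (k % servers.toNat) ≠ [] := by
      intro h
      have := congrArg List.length h
      simp [hlen] at this; omega
    obtain ⟨h0, t0, hrot⟩ := List.exists_cons_of_ne_nil hne
    have hidx : (0 + k % servers.toNat) % L.length = k % servers.toNat := by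
      rw [hlen, Nat.zero_add]
      exact Nat.mod_eq_of_lt (Nat.mod_lt _ hn)
    have hhead : h0 = ((k % servers.toNat : Nat) : Int) := by
      have h1 : (L.rotate (k % servers.toNat))[0]'(by simp [hrot]) = h0 := by simp [hrot]
      rw [List.getElem_rotate, hLk _ (by rw [hidx, hlen]; exact Nat.mod_lt _ hn)] at h1
      rw [← h1, hidx]
    have htail : t0 ++ [h0] = L.rotate ((k + 1) % servers.toNat) := by
      have : (h0 :: t0).rotate 1 = t0 ++ [h0] := by simp [List.rotate_cons_succ]
      rw [← this, ← hrot, List.rotate_rotate, ← List.rotate_mod, hlen]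
      congr 1
      simp [Nat.add_mod]
    subst hhead
    have hmod : PySem.Int.mod (k : Int) servers = ((k % servers.toNat : Nat) : Int) := by
      have h2 : servers = ((servers.toNat : Nat) : Int) := by omega
      conv_lhs => rw [h2, PySem.Int.mod_natCast]
    rw [PySem.List.enumerate_cons]
    simp only [List.foldl_cons]
    have hstep : pvAStep false (logs, L.rotate (k % servers.toNat), lss) req
        = (logs, L.rotate ((k + 1) % servers.toNat),
           pvAppendAt lss ((k % servers.toNat : Nat) : Int) req) := by
      simp only [pvAStep, hrot, Bool.false_eq_true, if_false, htail]
    rw [hrot, ← hrot, hstep, hmod]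
    have := ih (k + 1) logs (pvAppendAt lss ((k % servers.toNat : Nat) : Int) req)
    push_cast at this ⊢
    exact this

-- ===== VERDICT (by name: the statement is the Claim_ definition above) =====
theorem solution_spec : Claim_equal_solution := by
  intro servers sticky requests _hdom hpre
  unfold Spec_solution solution solution_alt
  cases sticky with
  | true =>
    simp only [if_true]
    apply sticky_fold servers requests 0 PySem.Dict.empty
    · rw [List.filter_eq_self.2 ?_]
      · simp [Function.comp_def]
      · intro e he
        obtain ⟨i, hi, rfl⟩ := List.mem_map.1 he
        simp [pvValid, init_last_getD servers i hi]
    · intro e he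
      obtain ⟨i, hi, rfl⟩ := List.mem_map.1 he
      have := (PySem.List.mem_pyRange_one.1 hi).2
      simp; omega
    · exact List.Perm.refl _
    · intro r s h; simp [PySem.Dict.get?_empty] at h
  | false =>
    simp only [Bool.false_eq_true, if_false]
    rcases hpre with hs | hreq
    · have := nonsticky_fold servers hs requests 0 PySem.Dict.empty
        ((PySem.List.pyRange 0 servers 1).map (fun _ => []))
      simpa [List.rotate_zero] using this
    · subst hreq; simp [PySem.List.enumerate]
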